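-- pv_equiv track=rewrite | github.com/FelixKleineBoesing/adventOfCode | python/aoc/day_one.py | find_max_calorie_elf
-- ===== SOURCE A (Python) =====
-- from typing import List
--
-- def find_max_calorie_elf(lines: List[str]):
--     max_calorie_elf = 1
--     max_calories = 0
--     current_calories = 0
--     current_elf = 1
--     for line in lines:
--         line = line.replace("\n", "")
--         if len(line) == 0:
--             if current_calories > max_calories:
--                 max_calories = current_calories
--                 max_calorie_elf = current_elf
--
--             current_elf += 1
--             current_calories = 0
--         else:
--             current_calories += int(line)
--
--     return max_calorie_elf, max_calories
-- ===== SOURCE B (Python) =====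
-- from typing import List
--
-- def find_max_calorie_elf(lines: List[str]):
--     # pass 1: parse into a table of per-elf totals (final unterminated group dropped, as in A)
--     totals = []
--     current = 0
--     for line in lines:
--         line = line.replace("\n", "")
--         if len(line) == 0:
--             totals.append(current)
--             current = 0
--         else:
--             current += int(line)
--     # pass 2: reduce over the table
--     max_calorie_elf = 1
--     max_calories = 0
--     for elf, total in enumerate(totals, start=1):
--         if total > max_calories:
--             max_calories = total
--             max_calorie_elf = elf
--     return max_calorie_elf, max_calories
-- ===== Notes on version B (the rewrite author's own statement) =====
-- stated objective: alternative
-- what changed: A's single streaming loop carrying four state variables is split into two passes: parse the lines into a list of per-elf totals, then a separate reduction over that table picks the first maximal elf.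
import Mathlib
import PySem

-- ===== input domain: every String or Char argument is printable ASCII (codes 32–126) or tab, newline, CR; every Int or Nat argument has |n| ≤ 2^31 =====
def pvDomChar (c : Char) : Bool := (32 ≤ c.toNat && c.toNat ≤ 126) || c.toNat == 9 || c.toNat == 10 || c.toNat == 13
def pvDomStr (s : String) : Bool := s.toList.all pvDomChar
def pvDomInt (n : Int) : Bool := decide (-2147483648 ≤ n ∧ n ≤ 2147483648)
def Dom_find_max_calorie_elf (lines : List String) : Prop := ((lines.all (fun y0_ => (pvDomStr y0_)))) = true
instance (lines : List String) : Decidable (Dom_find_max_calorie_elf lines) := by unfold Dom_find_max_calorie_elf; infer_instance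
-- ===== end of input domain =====

-- B splits A's single four-variable streaming loop into two passes (parse per-elf totals, then reduce); alternative decomposition, same cost.

-- ===== PORT A =====
-- state: (max_calorie_elf, max_calories, current_calories, current_elf)
-- int(line) is PySem.Int.ofStr?; none = ValueError, excluded by Pre_ (getD 0 is never claimed about)
def stepA (s : Int × Int × Int × Int) (line : String) : Int × Int × Int × Int :=
  let l := PySem.Str.replace line "\n" ""
  if l = "" then
    if s.2.2.1 > s.2.1 then (s.2.2.2, s.2.2.1, 0, s.2.2.2 + 1)
    else (s.1, s.2.1, 0, s.2.2.2 + 1)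
  else (s.1, s.2.1, s.2.2.1 + (PySem.Int.ofStr? l).getD 0, s.2.2.2)

def find_max_calorie_elf (lines : List String) : Int × Int :=
  let s := lines.foldl stepA (1, 0, 0, 1)
  (s.1, s.2.1)

-- ===== PORT B =====
-- pass 1: (totals, current)
def stepB1 (s : List Int × Int) (line : String) : List Int × Int :=
  let l := PySem.Str.replace line "\n" ""
  if l = "" then (s.1 ++ [s.2], 0)
  else (s.1, s.2 + (PySem.Int.ofStr? l).getD 0)

-- pass 2: (max_calorie_elf, max_calories) over enumerate(totals, start=1)
def stepB2 (m : Int × Int) (p : Int × Int) : Int × Int :=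
  if p.2 > m.2 then (p.1, p.2) else m

def find_max_calorie_elf_alt (lines : List String) : Int × Int :=
  let totals := (lines.foldl stepB1 ([], 0)).1
  (PySem.List.enumerate totals 1).foldl stepB2 (1, 0)

-- ===== PRECONDITION & SPEC =====
-- Pre_ excludes exactly the inputs where int(line) raises ValueError in A (a non-blank line, after
-- removing newlines, that is not a Python int literal).
def Pre_find_max_calorie_elf (lines : List String) : Prop :=
  (lines.all (fun line =>
    let l := PySem.Str.replace line "\n" ""
    l == "" || (PySem.Int.ofStr? l).isSome)) = true
instance (lines : List String) : Decidable (Pre_find_max_calorie_elf lines) := by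
  unfold Pre_find_max_calorie_elf; infer_instance

def pvWitness_find_max_calorie_elf : List String := ["1", "2\n", "", " -3 ", "", "+7", ""]

def Spec_find_max_calorie_elf (lines : List String) (out : Int × Int) : Prop := out = find_max_calorie_elf_alt lines
instance (lines : List String) (out : Int × Int) : Decidable (Spec_find_max_calorie_elf lines out) := by unfold Spec_find_max_calorie_elf; infer_instance

-- ===== CLAIM (what is proved, stated in full; the proofs are below) =====
def Claim_equal_find_max_calorie_elf : Prop := ∀ (lines : List String), Dom_find_max_calorie_elf lines → Pre_find_max_calorie_elf lines → Spec_find_max_calorie_elf lines (find_max_calorie_elf lines)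

-- ===== LEMMAS AND PROOFS =====

-- A's state corresponding to B's pass-1 state (totals, cur)
def glue (totals : List Int) (cur : Int) : Int × Int × Int × Int :=
  let m := (PySem.List.enumerate totals 1).foldl stepB2 (1, 0)
  (m.1, m.2, cur, (totals.length : Int) + 1)

theorem red_append (totals : List Int) (c : Int) :
    (PySem.List.enumerate (totals ++ [c]) 1).foldl stepB2 (1, 0)
      = stepB2 ((PySem.List.enumerate totals 1).foldl stepB2 (1, 0)) (1 + totals.length, c) := by
  rw [PySem.List.enumerate_append]
  simp [PySem.List.enumerate]

theorem glue_invariant (lines : List String) (totals : List Int) (cur : Int) :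
    lines.foldl stepA (glue totals cur)
      = glue (lines.foldl stepB1 (totals, cur)).1 (lines.foldl stepB1 (totals, cur)).2 := by
  induction lines generalizing totals cur with
  | nil => rfl
  | cons line rest ih =>
    simp only [List.foldl_cons]
    by_cases hl : PySem.Str.replace line "\n" "" = ""
    · have hA : stepA (glue totals cur) line = glue (totals ++ [cur]) 0 := by
        simp only [stepA, glue, hl, if_pos, red_append]
        by_cases hc : cur > ((PySem.List.enumerate totals 1).foldl stepB2 (1, 0)).2
        · simp [hc, stepB2]
          ring
        · simp [hc, stepB2]
      have hB : stepB1 (totals, cur) line = (totals ++ [cur], 0) := by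
        simp [stepB1, hl]
      rw [hA, hB, ih]
    · have hA : stepA (glue totals cur) line
          = glue totals (cur + (PySem.Int.ofStr? (PySem.Str.replace line "\n" "")).getD 0) := by
        simp [stepA, glue, hl]
      have hB : stepB1 (totals, cur) line
          = (totals, cur + (PySem.Int.ofStr? (PySem.Str.replace line "\n" "")).getD 0) := by
        simp [stepB1, hl]
      rw [hA, hB, ih]

-- ===== VERDICT (by name: the statement is the Claim_ definition above) =====
theorem find_max_calorie_elf_spec : Claim_equal_find_max_calorie_elf := by
  intro lines _ _
  unfold Spec_find_max_calorie_elf find_max_calorie_elf find_max_calorie_elf_alt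
  have h0 : (1, 0, 0, 1) = glue [] 0 := by rfl
  rw [h0, glue_invariant]
  rfl
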